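-- pv_equiv track=rewrite | github.com/RunxinShao/neetcode-submissions | Python Coding Interviews/python-enumerate/submission-0.py | get_dist_between_sevens
-- ===== SOURCE A (Python) =====
-- from typing import List
--
-- def get_dist_between_sevens(nums: List[int]) -> int:
--     count = 0
--     first = -1
--     for i,n in enumerate(nums):
--         if n == 7 and count == 0:
--             first = i
--             count += 1
--         elif n == 7 and count == 1:
--             return i - first
--     return first
-- ===== SOURCE B (Python) =====
-- from typing import List
--
-- def get_dist_between_sevens(nums: List[int]) -> int:
--     if 7 not in nums:
--         return -1
--     first = nums.index(7)
--     rest = nums[first + 1:]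
--     if 7 not in rest:
--         return first
--     return rest.index(7) + 1
-- ===== Notes on version B (the rewrite author's own statement) =====
-- stated objective: simpler
-- what changed: Replaces A's enumerate loop with count/first state and early return by staged library searches: a membership test, nums.index(7), a slice past the first seven, and a second membership/index on the slice.
import Mathlib
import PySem

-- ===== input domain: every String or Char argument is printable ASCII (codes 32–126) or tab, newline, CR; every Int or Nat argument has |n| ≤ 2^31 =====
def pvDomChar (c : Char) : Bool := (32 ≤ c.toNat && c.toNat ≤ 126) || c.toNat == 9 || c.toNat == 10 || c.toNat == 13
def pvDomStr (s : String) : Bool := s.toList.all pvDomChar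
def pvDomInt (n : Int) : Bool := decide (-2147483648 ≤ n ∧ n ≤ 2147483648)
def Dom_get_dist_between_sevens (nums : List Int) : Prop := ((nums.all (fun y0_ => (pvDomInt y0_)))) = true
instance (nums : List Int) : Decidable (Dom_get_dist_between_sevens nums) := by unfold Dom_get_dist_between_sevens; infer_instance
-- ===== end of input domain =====

-- B replaces A's count/first state machine over enumerate with staged library searches
-- (membership test, index, slice past the first seven, second index); objective: simpler.


-- ===== PORT A =====
-- A: one pass over enumerate with count/first state, early return at the second seven
def pvLoopA : List (Int × Int) → Int → Int → Int
  | [], _, first => first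
  | (i, n) :: rest, count, first =>
    if n == 7 && count == 0 then pvLoopA rest (count + 1) i
    else if n == 7 && count == 1 then i - first
    else pvLoopA rest count first

def get_dist_between_sevens (nums : List Int) : Int :=
  pvLoopA (PySem.List.enumerate nums 0) 0 (-1)

-- ===== PORT B =====
-- B: staged searches — membership test, nums.index(7), slice past it, second membership/index.
-- The .getD 0 after index? only realises values the preceding membership guard guarantees exist
-- (Python's .index cannot raise there).
def get_dist_between_sevens_alt (nums : List Int) : Int :=
  if nums.contains 7 = false then -1
  else
    let first : Nat := (PySem.List.index? nums 7).getD 0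
    let rest := PySem.List.slice nums (some ((first : Int) + 1)) none
    if rest.contains 7 = false then (first : Int)
    else ((PySem.List.index? rest 7).getD 0 : Int) + 1

-- ===== PRECONDITION & SPEC =====
def Spec_get_dist_between_sevens (nums : List Int) (out : Int) : Prop := out = get_dist_between_sevens_alt nums
instance (nums : List Int) (out : Int) : Decidable (Spec_get_dist_between_sevens nums out) := by unfold Spec_get_dist_between_sevens; infer_instance

-- ===== CLAIM (what is proved, stated in full; the proofs are below) =====
def Claim_equal_get_dist_between_sevens : Prop := ∀ (nums : List Int), Dom_get_dist_between_sevens nums → Spec_get_dist_between_sevens nums (get_dist_between_sevens nums)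

-- ===== LEMMAS AND PROOFS =====
def pvSeven (p : Int × Int) : Option Int := if p.2 == 7 then some p.1 else none

-- A's loop with count = 1: returns (first seven's index in e) - f, or f if none
theorem pvLoopA_one (e : List (Int × Int)) (f : Int) :
    pvLoopA e 1 f = match e.filterMap pvSeven with
      | [] => f
      | j :: _ => j - f := by
  induction e generalizing f with
  | nil => rfl
  | cons p rest ih =>
    obtain ⟨i, n⟩ := p
    by_cases h : n = 7 <;> simp [pvLoopA, pvSeven, h, ih]

-- A's result is determined by the list of indices of sevens
theorem pvLoopA_zero (e : List (Int × Int)) :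
    pvLoopA e 0 (-1) = match e.filterMap pvSeven with
      | a :: b :: _ => b - a
      | [a] => a
      | [] => -1 := by
  induction e with
  | nil => rfl
  | cons p rest ih =>
    obtain ⟨i, n⟩ := p
    by_cases h : n = 7
    · have hc : (n == 7 && (0 : Int) == 0) = true := by simp [h]
      have hf : List.filterMap pvSeven ((i, n) :: rest) = i :: rest.filterMap pvSeven := by
        simp [pvSeven, h]
      simp only [pvLoopA, hc, if_pos]
      rw [show ((0:Int)+1) = 1 from rfl, pvLoopA_one rest i, hf]
      cases rest.filterMap pvSeven <;> rfl
    · simp [pvLoopA, pvSeven, h, ih]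

theorem pvFm_nil (xs : List Int) (s : Int) (h : (7:Int) ∉ xs) :
    (PySem.List.enumerate xs s).filterMap pvSeven = [] := by
  induction xs generalizing s with
  | nil => rfl
  | cons x t ih =>
    have h1 : x ≠ 7 := fun hx => h (by simp [hx])
    have h2 : (7:Int) ∉ t := fun ht => h (List.mem_cons_of_mem _ ht)
    rw [PySem.List.enumerate_cons, List.filterMap_cons,
        show pvSeven (s, x) = none by simp [pvSeven, h1], ih (s + 1) h2]

theorem pvFm_cons (xs : List Int) (s : Int) (j : Nat)
    (h : PySem.List.index? xs 7 = some j) :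
    (PySem.List.enumerate xs s).filterMap pvSeven =
      (s + (j : Int)) :: (PySem.List.enumerate (xs.drop (j + 1)) (s + (j : Int) + 1)).filterMap pvSeven := by
  induction xs generalizing s j with
  | nil => simp [PySem.List.index?] at h
  | cons x t ih =>
    by_cases hx : x = 7
    · subst hx
      rw [PySem.List.index?_cons_self] at h
      cases h
      rw [PySem.List.enumerate_cons]
      simp [pvSeven]
    · rw [PySem.List.index?_cons_of_ne t hx] at h
      cases hj' : PySem.List.index? t 7 with
      | none => rw [hj'] at h; simp at h
      | some j' =>
        rw [hj'] at h
        simp only [Option.map_some] at h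
        cases h
        have hd : (x :: t).drop (j' + 1 + 1) = t.drop (j' + 1) := by simp
        rw [PySem.List.enumerate_cons]
        simp only [List.filterMap_cons]
        rw [show pvSeven (s, x) = none from by simp [pvSeven, hx], ih (s + 1) j' hj', hd]
        show _ :: _ = _ :: _
        refine List.cons_eq_cons.mpr ⟨by push_cast; ring, ?_⟩
        congr 1; push_cast; ring_nf

-- B on a list without sevens
theorem pvAlt_none (nums : List Int) (hc : nums.contains 7 = false) :
    get_dist_between_sevens_alt nums = -1 := by
  simp only [get_dist_between_sevens_alt, hc, if_pos]

-- B once the first seven's position is known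
theorem pvAlt_some (nums : List Int) (k : Nat) (hk : PySem.List.index? nums 7 = some k) :
    get_dist_between_sevens_alt nums =
      if (nums.drop (k + 1)).contains 7 = false then (k : Int)
      else ((PySem.List.index? (nums.drop (k + 1)) 7).getD 0 : Int) + 1 := by
  have hm : (7:Int) ∈ nums := (PySem.List.index?_isSome_iff nums 7).mp (by rw [hk]; rfl)
  have hc : nums.contains 7 = true := by simpa using hm
  simp only [get_dist_between_sevens_alt, hk, Option.getD_some]
  rw [if_neg (by simp [hm]),
      show ((k : Int) + 1) = ((k + 1 : Nat) : Int) by push_cast; ring,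
      PySem.List.slice_from_natCast]

theorem get_dist_eq (nums : List Int) :
    get_dist_between_sevens nums = get_dist_between_sevens_alt nums := by
  by_cases hm : (7:Int) ∈ nums
  · obtain ⟨k, hk⟩ : ∃ k, PySem.List.index? nums 7 = some k :=
      Option.isSome_iff_exists.mp ((PySem.List.index?_isSome_iff nums 7).mpr hm)
    rw [get_dist_between_sevens, pvLoopA_zero, pvFm_cons nums 0 k hk, pvAlt_some nums k hk]
    by_cases hm2 : (7:Int) ∈ nums.drop (k + 1)
    · obtain ⟨j, hj⟩ : ∃ j, PySem.List.index? (nums.drop (k + 1)) 7 = some j :=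
        Option.isSome_iff_exists.mp ((PySem.List.index?_isSome_iff _ 7).mpr hm2)
      rw [pvFm_cons _ _ j hj, if_neg (by simp [hm2]), hj]
      simp only [Option.getD_some]
      ring_nf
    · rw [pvFm_nil _ _ hm2, if_pos (by simpa using hm2)]
      simp
  · have hc : nums.contains 7 = false := by simpa using hm
    rw [get_dist_between_sevens, pvLoopA_zero, pvFm_nil nums 0 hm, pvAlt_none nums hc]

-- ===== VERDICT (by name: the statement is the Claim_ definition above) =====
theorem get_dist_between_sevens_spec : Claim_equal_get_dist_between_sevens := by
  intro nums _
  exact get_dist_eq nums
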